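-- pv_equiv track=rewrite | github.com/ysuryavanshi/leetcode | 2379-maximum-total-importance-of-roads/maximum-total-importance-of-roads.py | maximumImportance
-- ===== SOURCE A (Python) =====
-- def maximumImportance(n: int, roads: list[list[int]]) -> int:
--     count = [0] * n
--
--     for road in roads:
--         count[road[0]] += 1
--         count[road[1]] += 1
--
--     max_imp = 0
--     count.sort(reverse=True)
--     for c in count:
--         max_imp += c * n
--         n -= 1
--     return max_imp
-- ===== SOURCE B (Python) =====
-- def maximumImportance(n: int, roads: list[list[int]]) -> int:
--     count = [0] * n
--     for road in roads:
--         count[road[0]] += 1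
--         count[road[1]] += 1
--     # counting sort: histogram of degrees, then walk degrees high-to-low
--     freq = {}
--     for c in count:
--         freq[c] = freq.get(c, 0) + 1
--     total = 0
--     w = n
--     for d in range(2 * len(roads), -1, -1):
--         for _ in range(freq.get(d, 0)):
--             total += d * w
--             w -= 1
--     return total
-- ===== Notes on version B (the rewrite author's own statement) =====
-- stated objective: alternative
-- what changed: Replaces the comparison sort of the degree array by a counting sort: a histogram of degrees is built in one pass and degrees are emitted from highest to lowest while pairing them with the weights n, n-1, ..., 1.
import Mathlib
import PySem

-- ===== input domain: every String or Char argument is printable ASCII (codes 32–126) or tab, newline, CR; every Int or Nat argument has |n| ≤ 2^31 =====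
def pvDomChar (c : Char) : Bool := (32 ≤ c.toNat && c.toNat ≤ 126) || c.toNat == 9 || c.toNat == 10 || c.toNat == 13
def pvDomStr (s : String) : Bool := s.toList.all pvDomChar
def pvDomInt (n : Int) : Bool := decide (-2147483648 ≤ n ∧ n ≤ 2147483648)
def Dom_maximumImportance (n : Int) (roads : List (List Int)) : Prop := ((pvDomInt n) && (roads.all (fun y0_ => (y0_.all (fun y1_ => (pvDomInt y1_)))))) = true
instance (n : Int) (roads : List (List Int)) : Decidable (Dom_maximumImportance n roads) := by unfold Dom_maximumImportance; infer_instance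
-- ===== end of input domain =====

-- B replaces A's comparison sort of the degree array by a counting sort: a degree histogram
-- walked from the highest possible degree down, paired with the weights n, n-1, ..., 1.

-- ===== PORT A =====
-- the first phase, identical in both Pythons: build the degree array `count`
def pvDegrees (n : Int) (roads : List (List Int)) : List Int :=
  roads.foldl (fun c road =>
    let i := PySem.List.pyGetD road 0 0
    let c := PySem.List.pySetD c i (PySem.List.pyGetD c i 0 + 1)
    let j := PySem.List.pyGetD road 1 0
    PySem.List.pySetD c j (PySem.List.pyGetD c j 0 + 1))
    (List.replicate n.toNat (0 : Int))

def maximumImportance (n : Int) (roads : List (List Int)) : Int :=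
  let count := pvDegrees n roads
  let count := PySem.List.sorted count (fun x => x) true
  (count.foldl (fun (st : Int × Int) c => (st.1 + c * st.2, st.2 - 1)) ((0 : Int), n)).1

-- ===== PORT B =====
def maximumImportance_alt (n : Int) (roads : List (List Int)) : Int :=
  let count := pvDegrees n roads
  let freq := count.foldl (fun (f : PySem.Dict Int Int) c => f.insert c (f.getD c 0 + 1)) PySem.Dict.empty
  let st := (PySem.List.pyRange (2 * (roads.length : Int)) (-1) (-1)).foldl
    (fun (st : Int × Int) d =>
      (PySem.List.pyRange 0 (freq.getD d 0) 1).foldl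
        (fun (st : Int × Int) _ => (st.1 + d * st.2, st.2 - 1)) st)
    ((0 : Int), n)
  st.1

-- ===== PRECONDITION & SPEC =====
-- Pre_: exactly the inputs where A raises no IndexError: every road has at least two
-- entries and its first two entries are in-range (possibly negative) indices into the
-- degree array of length n (so n ≤ 0 forces roads = []).
def Pre_maximumImportance (n : Int) (roads : List (List Int)) : Prop :=
  ∀ r ∈ roads, 2 ≤ r.length ∧
    PySem.Raise.InRange n.toNat (r.getD 0 0) ∧ PySem.Raise.InRange n.toNat (r.getD 1 0)
instance (n : Int) (roads : List (List Int)) : Decidable (Pre_maximumImportance n roads) := by unfold Pre_maximumImportance; infer_instance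

def pvWitness_maximumImportance : Int × List (List Int) := (5, [[0,1],[1,2],[2,0],[0,3]])

def Spec_maximumImportance (n : Int) (roads : List (List Int)) (out : Int) : Prop := out = maximumImportance_alt n roads
instance (n : Int) (roads : List (List Int)) (out : Int) : Decidable (Spec_maximumImportance n roads out) := by unfold Spec_maximumImportance; infer_instance

-- ===== CLAIM (what is proved, stated in full; the proofs are below) =====
def Claim_equal_maximumImportance : Prop := ∀ (n : Int) (roads : List (List Int)), Dom_maximumImportance n roads → Pre_maximumImportance n roads → Spec_maximumImportance n roads (maximumImportance n roads)

-- ===== LEMMAS AND PROOFS =====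

-- any element of xs with one slot overwritten is an old element or the new value
theorem pv_mem_pySetD (xs : List Int) (i v : Int) :
    ∀ x ∈ PySem.List.pySetD xs i v, x ∈ xs ∨ x = v := by
  intro x hx
  simp only [PySem.List.pySetD, PySem.List.pySet?, PySem.List.pyIdx?] at hx
  split_ifs at hx <;>
    simp only [Option.map_some, Option.map_none, Option.getD_some, Option.getD_none] at hx
  · exact List.mem_or_eq_of_mem_set hx
  · exact Or.inl hx
  · exact List.mem_or_eq_of_mem_set hx
  · exact Or.inl hx

-- a defaulted lookup is an element or the default
theorem pv_mem_pyGetD (xs : List Int) (i d : Int) :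
    PySem.List.pyGetD xs i d ∈ xs ∨ PySem.List.pyGetD xs i d = d := by
  have h : PySem.List.pyGetD xs i d = (PySem.List.pyGet? xs i).getD d := rfl
  rcases hg : PySem.List.pyGet? xs i with _ | y
  · right; simp [h, hg]
  · left; rw [h, hg, Option.getD_some]; exact PySem.List.mem_of_pyGet?_eq_some xs hg

-- one increment keeps all elements in [0, B+1]
theorem pv_incr_bound (c : List Int) (B i : Int) (hB : 0 ≤ B)
    (h : ∀ x ∈ c, 0 ≤ x ∧ x ≤ B) :
    ∀ x ∈ PySem.List.pySetD c i (PySem.List.pyGetD c i 0 + 1), 0 ≤ x ∧ x ≤ B + 1 := by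
  intro x hx
  rcases pv_mem_pySetD _ _ _ x hx with hm | he
  · have := h x hm; omega
  · rcases pv_mem_pyGetD c i 0 with hm | h0
    · have := h _ hm; omega
    · rw [he, h0]; omega

-- invariant of the degree-building fold: all entries stay in [0, B + 2·#roads]
theorem pv_deg_fold_bound : ∀ (rs : List (List Int)) (c : List Int) (B : Int), 0 ≤ B →
    (∀ x ∈ c, 0 ≤ x ∧ x ≤ B) →
    ∀ x ∈ rs.foldl (fun c road =>
        let i := PySem.List.pyGetD road 0 0
        let c := PySem.List.pySetD c i (PySem.List.pyGetD c i 0 + 1)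
        let j := PySem.List.pyGetD road 1 0
        PySem.List.pySetD c j (PySem.List.pyGetD c j 0 + 1)) c,
      0 ≤ x ∧ x ≤ B + 2 * rs.length := by
  intro rs
  induction rs with
  | nil => intro c B _ h x hx; simp only [List.foldl_nil] at hx
           have := h x hx; simp only [List.length_nil]; omega
  | cons r rs ih =>
      intro c B hB h x hx
      simp only [List.foldl_cons] at hx
      have h1 := pv_incr_bound c B (PySem.List.pyGetD r 0 0) hB h
      have h2 := pv_incr_bound _ (B + 1) (PySem.List.pyGetD r 1 0) (by omega) h1
      have := ih _ (B + 2) (by omega) (fun y hy => by have := h2 y hy; omega) x hx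
      simp only [List.length_cons]
      push_cast at this ⊢
      omega

-- every degree is in [0, 2·#roads]
theorem pv_degrees_bound (n : Int) (roads : List (List Int)) :
    ∀ x ∈ pvDegrees n roads, 0 ≤ x ∧ x < ((2 * roads.length + 1 : Nat) : Int) := by
  intro x hx
  have := pv_deg_fold_bound roads (List.replicate n.toNat 0) 0 le_rfl
    (fun y hy => by rw [List.eq_of_mem_replicate hy]; omega) x hx
  push_cast
  omega

-- the descending bucket list: degrees K-1, K-2, …, 0, each repeated as often as it occurs in l
def pvBuck (l : List Int) : Nat → List Int
  | 0 => []
  | k + 1 => List.replicate (l.count ((k : Int))) ((k : Int)) ++ pvBuck l k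

theorem pv_mem_pvBuck (l : List Int) : ∀ (k : Nat) (x : Int), x ∈ pvBuck l k → 0 ≤ x ∧ x < (k : Int) := by
  intro k
  induction k with
  | zero => intro x hx; simp [pvBuck] at hx
  | succ k ih =>
      intro x hx
      rcases List.mem_append.mp hx with hx | hx
      · rw [List.eq_of_mem_replicate hx]; push_cast; omega
      · have := ih x hx; push_cast; omega

theorem pv_count_pvBuck (l : List Int) : ∀ (k : Nat) (x : Int),
    (pvBuck l k).count x = if 0 ≤ x ∧ x < (k : Int) then l.count x else 0 := by
  intro k
  induction k with
  | zero => intro x; rw [pvBuck]; rw [if_neg (by push_cast; omega)]; simp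
  | succ k ih =>
      intro x
      rw [pvBuck, List.count_append, List.count_replicate, ih]
      by_cases hx : x = (k : Int)
      · subst hx
        rw [if_pos (by simp), if_neg (by omega), if_pos (by push_cast; omega)]
        omega
      · rw [if_neg (by simpa using fun h => hx h.symm)]
        by_cases hr : 0 ≤ x ∧ x < (k : Int)
        · rw [if_pos hr, if_pos (by push_cast; omega)]
          omega
        · rw [if_neg hr, if_neg (by push_cast; omega)]

theorem pv_pairwise_pvBuck (l : List Int) : ∀ (k : Nat), (pvBuck l k).Pairwise (fun a b => b ≤ a) := by
  intro k
  induction k with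
  | zero => simp [pvBuck]
  | succ k ih =>
      rw [pvBuck, List.pairwise_append]
      refine ⟨List.pairwise_replicate.mpr (Or.inr le_rfl), ih, ?_⟩
      intro a ha b hb
      rw [List.eq_of_mem_replicate ha]
      exact le_of_lt (pv_mem_pvBuck l k b hb).2

theorem pv_perm_pvBuck (l : List Int) (K : Nat) (h : ∀ x ∈ l, 0 ≤ x ∧ x < (K : Int)) :
    (pvBuck l K).Perm l := by
  rw [List.perm_iff_count]
  intro x
  rw [pv_count_pvBuck]
  by_cases hx : 0 ≤ x ∧ x < (K : Int)
  · rw [if_pos hx]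
  · rw [if_neg hx]
    exact (List.count_eq_zero.mpr (fun hm => hx (h x hm))).symm

-- counting sort is sort: the descending bucket list IS sorted(l, reverse=True)
theorem pv_sorted_eq_pvBuck (l : List Int) (K : Nat) (h : ∀ x ∈ l, 0 ≤ x ∧ x < (K : Int)) :
    PySem.List.sorted l (fun x => x) true = pvBuck l K := by
  exact List.Perm.eq_of_pairwise
    (fun a b _ _ h1 h2 => le_antisymm h2 h1)
    (PySem.List.sorted_pairwise_rev l (fun x => x))
    (pv_pairwise_pvBuck l K)
    ((PySem.List.sorted_perm l (fun x => x) true).trans (pv_perm_pvBuck l K h).symm)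

-- a loop that ignores its index is a fold over a replicate of the same length
theorem pv_foldl_const {α : Type} (d : Int) : ∀ (l : List α) (st : Int × Int),
    l.foldl (fun (st : Int × Int) _ => (st.1 + d * st.2, st.2 - 1)) st
      = (List.replicate l.length d).foldl (fun (st : Int × Int) c => (st.1 + c * st.2, st.2 - 1)) st := by
  intro l
  induction l with
  | nil => intro st; rfl
  | cons a l ih => intro st; simp only [List.foldl_cons, List.length_cons, List.replicate_succ]; exact ih _

-- B's inner loop over range(freq[d])
theorem pv_inner (k d : Int) (st : Int × Int) :
    (PySem.List.pyRange 0 k 1).foldl (fun (st : Int × Int) _ => (st.1 + d * st.2, st.2 - 1)) st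
      = (List.replicate k.toNat d).foldl (fun (st : Int × Int) c => (st.1 + c * st.2, st.2 - 1)) st := by
  rw [pv_foldl_const]
  congr 1
  rw [PySem.List.length_pyRange_one]
  norm_num

-- B's outer countdown loop is a fold over the bucket list
theorem pv_outer (l : List Int) : ∀ (k : Nat) (st : Int × Int),
    (PySem.List.pyRange ((k : Int) - 1) (-1) (-1)).foldl
        (fun (st : Int × Int) d =>
          (List.replicate (l.count d) d).foldl (fun (st : Int × Int) c => (st.1 + c * st.2, st.2 - 1)) st) st
      = (pvBuck l k).foldl (fun (st : Int × Int) c => (st.1 + c * st.2, st.2 - 1)) st := by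
  intro k
  induction k with
  | zero => intro st; rw [PySem.List.pyRange_neg_one_eq_nil (by norm_num)]; rfl
  | succ k ih =>
      intro st
      have hc : ((k + 1 : Nat) : Int) - 1 = (k : Int) := by push_cast; ring
      rw [hc, PySem.List.pyRange_neg_one_cons (by omega : (-1 : Int) < (k : Int))]
      simp only [List.foldl_cons]
      rw [ih, pvBuck, List.foldl_append]

-- ===== VERDICT (by name: the statement is the Claim_ definition above) =====
theorem maximumImportance_spec : Claim_equal_maximumImportance := by
  intro n roads _ _
  unfold Spec_maximumImportance maximumImportance maximumImportance_alt
  dsimp only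
  have hb := pv_degrees_bound n roads
  rw [pv_sorted_eq_pvBuck (pvDegrees n roads) (2 * roads.length + 1) hb]
  have hfreq : ∀ d : Int,
      ((pvDegrees n roads).foldl
        (fun (f : PySem.Dict Int Int) c => f.insert c (f.getD c 0 + 1)) PySem.Dict.empty).getD d 0
      = (((pvDegrees n roads).count d : Nat) : Int) := by
    intro d
    rw [PySem.Dict.getD_foldl_insert_add_one]
    simp
  simp only [hfreq, pv_inner, Int.toNat_natCast]
  have hm : (2 * (roads.length : Int)) = ((2 * roads.length + 1 : Nat) : Int) - 1 := by
    push_cast; ring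
  rw [hm, pv_outer (pvDegrees n roads) (2 * roads.length + 1)]
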